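-- pv_equiv track=rewrite | github.com/BrunoHF04/SanitizadorRTF | rtf_sanitize.py | _calcular_grupos_abertos
-- ===== SOURCE A (Python) =====
-- def _calcular_grupos_abertos(rtf: str) -> int:
--     """
--     Conta o saldo de grupos RTF abertos por chaves não escapadas.
--
--     Em RTF, somente "{" e "}" não precedidos por "\" delimitam grupos.
--     """
--     saldo = 0
--     i = 0
--     n = len(rtf)
--     while i < n:
--         ch = rtf[i]
--         if ch == "\\":
--             # Ignora o caractere seguinte (inclui \{, \}, \\ e escapes hex).
--             i += 2
--             continue
--         if ch == "{":
--             saldo += 1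
--         elif ch == "}":
--             if saldo > 0:
--                 saldo -= 1
--         i += 1
--     return saldo
-- ===== SOURCE B (Python) =====
-- import re
--
-- def _calcular_grupos_abertos(rtf: str) -> int:
--     # Two-pass: strip every backslash escape in one regex pass, then do pure brace balancing.
--     limpio = re.sub(r'\\[\s\S]', '', rtf)
--     saldo = 0
--     for ch in limpio:
--         if ch == '{':
--             saldo += 1
--         elif ch == '}':
--             saldo = max(0, saldo - 1)
--     return saldo
-- ===== Notes on version B (the rewrite author's own statement) =====
-- stated objective: simpler
-- what changed: Replaces A's single interleaved scan with index jumping by a two-pass decomposition: one regex pass deletes every backslash escape (backslash plus the escaped character), then a plain loop does only brace balancing with a max(0, ...) floor.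
import Mathlib
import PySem

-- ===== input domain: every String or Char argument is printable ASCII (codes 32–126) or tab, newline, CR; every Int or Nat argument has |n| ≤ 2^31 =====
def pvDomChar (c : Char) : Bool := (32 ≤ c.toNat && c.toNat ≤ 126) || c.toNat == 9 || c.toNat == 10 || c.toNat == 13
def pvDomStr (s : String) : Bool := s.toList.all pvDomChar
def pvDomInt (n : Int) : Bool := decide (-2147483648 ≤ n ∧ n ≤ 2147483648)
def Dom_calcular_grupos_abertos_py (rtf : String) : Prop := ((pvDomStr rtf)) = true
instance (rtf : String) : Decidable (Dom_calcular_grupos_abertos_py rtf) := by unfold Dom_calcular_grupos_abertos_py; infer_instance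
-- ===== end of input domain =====

-- ===== PORT A =====
-- A: single scan with index jumping (i += 2 on a backslash), counting unescaped braces.
def pvLoopA : List Char → Int → Int
  | [], saldo => saldo
  | c :: rest, saldo =>
    if c = '\\' then pvLoopA (rest.drop 1) saldo          -- i += 2: skip the escaped char
    else if c = '{' then pvLoopA rest (saldo + 1)
    else if c = '}' then pvLoopA rest (if saldo > 0 then saldo - 1 else saldo)
    else pvLoopA rest saldo
termination_by l _ => l.length
decreasing_by all_goals simp

def calcular_grupos_abertos_py (rtf : String) : Int := pvLoopA rtf.toList 0

-- ===== PORT B =====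
-- B is two-pass: re.sub(r'\\[\s\S]', '', rtf) deletes each backslash together with the
-- character after it, left to right, non-overlapping; a lone trailing backslash stays.
-- pvStripEsc is an exact hand port of that regex substitution for this pattern.
def pvStripEsc : List Char → List Char
  | [] => []
  | ['\\'] => ['\\']
  | '\\' :: _ :: rest => pvStripEsc rest
  | c :: rest => c :: pvStripEsc rest

def pvBalStep (saldo : Int) (c : Char) : Int :=
  if c = '{' then saldo + 1
  else if c = '}' then max 0 (saldo - 1)
  else saldo

def calcular_grupos_abertos_py_alt (rtf : String) : Int :=
  (pvStripEsc rtf.toList).foldl pvBalStep 0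

-- ===== PRECONDITION & SPEC =====
def Spec_calcular_grupos_abertos_py (rtf : String) (out : Int) : Prop := out = calcular_grupos_abertos_py_alt rtf
instance (rtf : String) (out : Int) : Decidable (Spec_calcular_grupos_abertos_py rtf out) := by unfold Spec_calcular_grupos_abertos_py; infer_instance

-- ===== CLAIM (what is proved, stated in full; the proofs are below) =====
def Claim_equal_calcular_grupos_abertos_py : Prop := ∀ (rtf : String), Dom_calcular_grupos_abertos_py rtf → Spec_calcular_grupos_abertos_py rtf (calcular_grupos_abertos_py rtf)

-- ===== LEMMAS AND PROOFS =====

-- ===== VERDICT (by name: the statement is the Claim_ definition above) =====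
-- A's loop equals B's strip-then-fold, for any nonnegative running balance.
theorem pvLoop_eq_fold : ∀ (n : Nat) (l : List Char), l.length ≤ n → ∀ (s : Int), 0 ≤ s →
    pvLoopA l s = (pvStripEsc l).foldl pvBalStep s := by
  intro n
  induction n with
  | zero =>
    intro l hl s _
    have : l = [] := List.eq_nil_of_length_eq_zero (Nat.le_zero.mp hl)
    subst this; simp [pvLoopA, pvStripEsc]
  | succ n ih =>
    intro l hl s hs
    match l with
    | [] => simp [pvLoopA, pvStripEsc]
    | c :: rest =>
      by_cases hb : c = '\\'
      · subst hb
        match rest with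
        | [] => simp [pvLoopA, pvStripEsc, pvBalStep]
        | d :: rest' =>
          have h2 : rest'.length ≤ n := by simp at hl; omega
          simp only [pvLoopA, List.drop_succ_cons, List.drop_zero]
          rw [show pvStripEsc ('\\' :: d :: rest') = pvStripEsc rest' from rfl]
          exact ih rest' h2 s hs
      · have h1 : rest.length ≤ n := by simp at hl; omega
        have hstrip : pvStripEsc (c :: rest) = c :: pvStripEsc rest := by
          match rest with
          | [] => simp [pvStripEsc, hb]
          | _ :: _ => simp [pvStripEsc, hb]
        rw [hstrip]
        by_cases h1' : c = '{'
        · subst h1'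
          simp only [pvLoopA, List.foldl_cons, pvBalStep]
          exact ih rest h1 (s + 1) (by omega)
        · by_cases h2' : c = '}'
          · subst h2'
            simp only [pvLoopA, List.foldl_cons, pvBalStep]
            have he : (if s > 0 then s - 1 else s) = max 0 (s - 1) := by omega
            rw [he]
            exact ih rest h1 (max 0 (s - 1)) (by omega)
          · simp only [pvLoopA, List.foldl_cons, pvBalStep, hb, h1', h2', if_false]
            exact ih rest h1 s hs

theorem calcular_grupos_abertos_py_spec : Claim_equal_calcular_grupos_abertos_py := by
  intro rtf _
  unfold Spec_calcular_grupos_abertos_py calcular_grupos_abertos_py calcular_grupos_abertos_py_alt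
  exact pvLoop_eq_fold rtf.toList.length rtf.toList le_rfl 0 le_rfl
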